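-- pv_equiv track=rewrite | github.com/prsnt558908/CodeZymSolutions | q66-warehouse-dispatch-credits/solution-2-python/Solution.py | maxCredits
-- ===== SOURCE A (Python) =====
-- def maxCredits(inventory, dispatch1, dispatch2, skips):
--     """
--     For a warehouse with inventory x:
--     - Normal round removes t = dispatch1 + dispatch2 (you then coworker).
--     - Let rem = x mod t, but treat rem=0 as rem=t (end would be on coworker without skips).
--     - If rem <= dispatch1, you already finish on your turn (0 skips).
--     - Otherwise, you can force extra consecutive "your" turns by making coworker skip.
--       Each skip gives one extra dispatch1 before coworker can act.
--       Minimum skips needed = ceil(rem / dispatch1) - 1 = floor((rem - 1) / dispatch1).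
--
--     Global optimum: each credit is value 1, cost = skips_needed.
--     Take warehouses with smallest costs until skip budget is exhausted.
--     """
--     a = int(dispatch1)
--     b = int(dispatch2)
--     k = int(skips)
--     t = a + b
--
--     costs = []
--     for x in inventory:
--         x = int(x)
--         rem = x % t
--         if rem == 0:
--             rem = t
--         need = (rem - 1) // a  # floor((rem-1)/a)
--         costs.append(need)
--
--     costs.sort()
--
--     used = 0
--     credits = 0
--     for need in costs:
--         if used + need <= k:
--             used += need
--             credits += 1
--         else:
--             break
--
--     return credits
-- ===== SOURCE B (Python) =====
-- def maxCredits(inventory, dispatch1, dispatch2, skips):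
--     a = int(dispatch1)
--     b = int(dispatch2)
--     k = int(skips)
--     t = a + b
--
--     costs = []
--     for x in inventory:
--         rem = int(x) % t
--         if rem == 0:
--             rem = t
--         costs.append((rem - 1) // a)
--
--     used = 0
--     credits = 0
--     # walk the distinct cost values in increasing order, taking whole buckets at once
--     for c in sorted(set(costs)):
--         m = costs.count(c)
--         if c <= 0:
--             taken = m if used + c <= k else 0
--         else:
--             taken = max(0, min(m, (k - used) // c))
--         credits += taken
--         used += taken * c
--         if taken < m:
--             break
--     return credits
-- ===== Notes on version B (the rewrite author's own statement) =====
-- stated objective: alternative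
-- what changed: Instead of sorting the full cost list and consuming credits one warehouse at a time, B walks the distinct cost values in increasing order and takes each equal-cost bucket in one arithmetic step (all free/none for cost<=0, floor((k-used)/c) clipped for cost>0), breaking at the first partially affordable bucket.
import Mathlib
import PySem

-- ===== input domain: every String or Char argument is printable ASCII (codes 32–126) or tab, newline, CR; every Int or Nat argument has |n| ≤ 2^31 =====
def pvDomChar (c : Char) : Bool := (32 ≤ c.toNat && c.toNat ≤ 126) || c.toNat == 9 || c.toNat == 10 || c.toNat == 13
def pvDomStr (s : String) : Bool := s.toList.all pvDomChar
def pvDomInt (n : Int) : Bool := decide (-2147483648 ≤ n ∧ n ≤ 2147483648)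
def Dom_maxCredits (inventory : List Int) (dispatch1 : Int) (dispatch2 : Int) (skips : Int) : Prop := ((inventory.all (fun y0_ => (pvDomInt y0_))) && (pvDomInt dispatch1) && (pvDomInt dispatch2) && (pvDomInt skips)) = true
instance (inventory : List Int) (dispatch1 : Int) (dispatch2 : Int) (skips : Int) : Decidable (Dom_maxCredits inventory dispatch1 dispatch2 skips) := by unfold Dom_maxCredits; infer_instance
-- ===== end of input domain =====

-- B replaces A's sort-all-then-take-one-credit-at-a-time greedy by a bucketed scan over the
-- distinct cost values in increasing order, taking each equal-cost bucket in one arithmetic step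
-- (objective: alternative decomposition, same asymptotic cost).


-- ===== PORT A =====
-- shared line of both Pythons: rem = x % t; if rem == 0: rem = t; (rem - 1) // a
def pvCostOf (a t x : Int) : Int :=
  let rem := PySem.Int.mod x t
  let rem := if rem = 0 then t else rem
  PySem.Int.floordiv (rem - 1) a

-- A's credit loop: for need in costs: if used+need<=k: used+=need; credits+=1 else break
def pvALoop (k : Int) : List Int → Int → Int → Int
  | [], _, credits => credits
  | need :: rest, used, credits =>
    if used + need ≤ k then pvALoop k rest (used + need) (credits + 1) else credits

def maxCredits (inventory : List Int) (dispatch1 : Int) (dispatch2 : Int) (skips : Int) : Int :=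
  let a := dispatch1
  let b := dispatch2
  let k := skips
  let t := a + b
  let costs := inventory.map (fun x => pvCostOf a t x)
  let costs := PySem.List.sorted costs (fun x => x) false
  pvALoop k costs 0 0

-- ===== PORT B =====
-- B's bucket size: taken = m if used+c<=k else 0 (c<=0), else max(0, min(m, (k-used)//c))
def pvTaken (k c used m : Int) : Int :=
  if c ≤ 0 then (if used + c ≤ k then m else 0)
  else max 0 (min m (PySem.Int.floordiv (k - used) c))

-- B's loop over the sorted distinct costs
def pvBLoop (k : Int) (costs : List Int) : List Int → Int → Int → Int
  | [], _, credits => credits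
  | c :: rest, used, credits =>
    let m : Int := (PySem.List.count costs c : Int)
    let taken := pvTaken k c used m
    if taken < m then credits + taken
    else pvBLoop k costs rest (used + taken * c) (credits + taken)

def maxCredits_alt (inventory : List Int) (dispatch1 : Int) (dispatch2 : Int) (skips : Int) : Int :=
  let a := dispatch1
  let b := dispatch2
  let k := skips
  let t := a + b
  let costs := inventory.map (fun x => pvCostOf a t x)
  pvBLoop k costs (PySem.List.sorted (PySem.Set.ofList costs) (fun x => x) false) 0 0

-- ===== PRECONDITION & SPEC =====
-- Pre_ excludes exactly the inputs where Python A raises ZeroDivisionError: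
-- dispatch1 + dispatch2 = 0 (the '%' in the cost loop) or dispatch1 = 0 (the '//').
-- With empty inventory neither division runs, so A is total there.
def Pre_maxCredits (inventory : List Int) (dispatch1 : Int) (dispatch2 : Int) (skips : Int) : Prop :=
  inventory = [] ∨ (dispatch1 ≠ 0 ∧ dispatch1 + dispatch2 ≠ 0)
instance (inventory : List Int) (dispatch1 : Int) (dispatch2 : Int) (skips : Int) : Decidable (Pre_maxCredits inventory dispatch1 dispatch2 skips) := by unfold Pre_maxCredits; infer_instance

def pvWitness_maxCredits : List Int × Int × Int × Int := ([7, 3, 12, 5, 5], 2, 3, 3)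

def Spec_maxCredits (inventory : List Int) (dispatch1 : Int) (dispatch2 : Int) (skips : Int) (out : Int) : Prop := out = maxCredits_alt inventory dispatch1 dispatch2 skips
instance (inventory : List Int) (dispatch1 : Int) (dispatch2 : Int) (skips : Int) (out : Int) : Decidable (Spec_maxCredits inventory dispatch1 dispatch2 skips out) := by unfold Spec_maxCredits; infer_instance

-- ===== CLAIM (what is proved, stated in full; the proofs are below) =====
def Claim_equal_maxCredits : Prop := ∀ (inventory : List Int) (dispatch1 : Int) (dispatch2 : Int) (skips : Int), Dom_maxCredits inventory dispatch1 dispatch2 skips → Pre_maxCredits inventory dispatch1 dispatch2 skips → Spec_maxCredits inventory dispatch1 dispatch2 skips (maxCredits inventory dispatch1 dispatch2 skips)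

-- ===== LEMMAS AND PROOFS =====

-- A's loop consumes a whole block of m equal costs c exactly as one bucket step of B.
theorem pvALoop_replicate (k c : Int) (m : Nat) : ∀ (rest : List Int) (used credits : Int),
    pvALoop k (List.replicate m c ++ rest) used credits =
      (if pvTaken k c used (m : Int) < (m : Int) then credits + pvTaken k c used (m : Int)
       else pvALoop k rest (used + pvTaken k c used (m : Int) * c) (credits + pvTaken k c used (m : Int))) := by
  induction m with
  | zero =>
    intro rest used credits
    have h0 : pvTaken k c used 0 = 0 := by
      unfold pvTaken
      by_cases hc : c ≤ 0
      · rw [if_pos hc]; split_ifs <;> rfl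
      · rw [if_neg hc]; omega
    simp [h0]
  | succ n ih =>
    intro rest used credits
    have hrep : List.replicate (n + 1) c = c :: List.replicate n c := rfl
    rw [hrep]
    simp only [List.cons_append, pvALoop]
    by_cases hstep : used + c ≤ k
    · rw [if_pos hstep, ih]
      push_cast
      have htk : pvTaken k c used ((n : Int) + 1) = pvTaken k c (used + c) (n : Int) + 1 := by
        unfold pvTaken
        by_cases hc : c ≤ 0
        · have h2 : used + c + c ≤ k := by omega
          simp [hc, hstep, h2]
        · have hcpos : 0 < c := by omega
          have hq1 : 1 ≤ PySem.Int.floordiv (k - used) c := by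
            rw [PySem.Int.le_floordiv_iff_mul_le hcpos]; omega
          have hshift : PySem.Int.floordiv (k - (used + c)) c = PySem.Int.floordiv (k - used) c - 1 := by
            rw [PySem.Int.floordiv_eq_ediv_of_pos hcpos, PySem.Int.floordiv_eq_ediv_of_pos hcpos]
            have harg : k - (used + c) = (k - used) + (-1) * c := by ring
            rw [harg, Int.add_mul_ediv_right _ _ (by omega : c ≠ 0)]
            ring
          rw [if_neg hc, if_neg hc, hshift]
          omega
      rw [htk]
      set T := pvTaken k c (used + c) (n : Int) with hT
      by_cases hlt : T < (n : Int)
      · rw [if_pos hlt, if_pos (by omega)]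
        ring
      · rw [if_neg hlt, if_neg (by omega)]
        rw [(by ring : used + (T + 1) * c = used + c + T * c),
            (by ring : credits + (T + 1) = credits + 1 + T)]
    · rw [if_neg hstep]
      push_cast
      have h0 : pvTaken k c used ((n : Int) + 1) = 0 := by
        unfold pvTaken
        by_cases hc : c ≤ 0
        · rw [if_pos hc, if_neg hstep]
        · have hcpos : 0 < c := by omega
          have hq : PySem.Int.floordiv (k - used) c < 1 := by
            rw [PySem.Int.floordiv_lt_iff_lt_mul hcpos]; omega
          rw [if_neg hc]
          omega
      rw [h0, if_pos (by omega : (0:Int) < (n : Int) + 1)]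
      ring

-- counting elements of a flatMap of replicates over a nodup key list
theorem pvCount_flatMap (costs : List Int) : ∀ (ks : List Int), ks.Nodup → ∀ (x : Int),
    List.count x (ks.flatMap (fun c => List.replicate (List.count c costs) c)) =
      (if x ∈ ks then List.count x costs else 0) := by
  intro ks
  induction ks with
  | nil => intro _ x; simp
  | cons c rest ih =>
    intro hnd x
    have hnd' : rest.Nodup := hnd.of_cons
    have hcx : c ∉ rest := (List.nodup_cons.mp hnd).1
    simp only [List.flatMap_cons, List.count_append, List.count_replicate, ih hnd' x, List.mem_cons]
    by_cases hxc : x = c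
    · subst hxc
      simp [hcx]
    · by_cases hxr : x ∈ rest
      · simp [hxr, hxc, Ne.symm hxc]
      · simp [hxr, hxc, Ne.symm hxc]

-- pairwise ≤ on the flatMap of replicates over a strictly increasing key list
theorem pvPairwise_flatMap (costs : List Int) : ∀ (ks : List Int), ks.Pairwise (· < ·) →
    (ks.flatMap (fun c => List.replicate (List.count c costs) c)).Pairwise (· ≤ ·) := by
  intro ks
  induction ks with
  | nil => intro _; simp
  | cons c rest ih =>
    intro hlt
    simp only [List.flatMap_cons]
    rw [List.pairwise_append]
    refine ⟨?_, ih hlt.of_cons, ?_⟩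
    · rw [List.pairwise_replicate]; right; exact le_refl c
    · intro p hp q hq
      have hpc : p = c := List.eq_of_mem_replicate hp
      obtain ⟨c', hc', hq'⟩ := List.mem_flatMap.mp hq
      have hqc : q = c' := List.eq_of_mem_replicate hq'
      have hcc : c < c' := (List.pairwise_cons.mp hlt).1 c' hc'
      omega

-- the fully-sorted cost list is the concatenation of the buckets of the sorted distinct costs
theorem pvSorted_eq_flatMap (costs : List Int) :
    PySem.List.sorted costs (fun x => x) false =
      (PySem.List.sorted (PySem.Set.ofList costs) (fun x => x) false).flatMap
        (fun c => List.replicate (List.count c costs) c) := by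
  set ks := PySem.List.sorted (PySem.Set.ofList costs) (fun x => x) false with hks
  have hlt : ks.Pairwise (· < ·) := PySem.List.sorted_ofList_pairwise_lt costs
  have hnd : ks.Nodup := hlt.imp (fun h => ne_of_lt h)
  have hmem : ∀ x, x ∈ ks ↔ x ∈ costs := by
    intro x
    rw [(PySem.List.sorted_perm (PySem.Set.ofList costs) (fun x => x) false).mem_iff]
    exact PySem.Set.mem_ofList costs x
  apply PySem.List.sorted_id_eq_of_perm_of_pairwise
  · rw [List.perm_iff_count]
    intro x
    rw [pvCount_flatMap costs ks hnd x]
    by_cases hx : x ∈ ks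
    · simp [hx]
    · have hxc : x ∉ costs := fun h => hx ((hmem x).mpr h)
      simp [hx, List.count_eq_zero.mpr hxc]
  · exact pvPairwise_flatMap costs ks hlt

-- A's loop over the concatenated buckets equals B's bucket loop
theorem pvALoop_flatMap (k : Int) (costs : List Int) : ∀ (ks : List Int) (used credits : Int),
    pvALoop k (ks.flatMap (fun c => List.replicate (List.count c costs) c)) used credits =
      pvBLoop k costs ks used credits := by
  intro ks
  induction ks with
  | nil => intro used credits; simp [pvALoop, pvBLoop]
  | cons c rest ih =>
    intro used credits
    simp only [List.flatMap_cons]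
    rw [pvALoop_replicate]
    simp only [pvBLoop, PySem.List.count_eq]
    by_cases hlt : pvTaken k c used ((List.count c costs : Nat) : Int) < ((List.count c costs : Nat) : Int)
    · rw [if_pos hlt, if_pos hlt]
    · rw [if_neg hlt, if_neg hlt, ih]

-- ===== VERDICT (by name: the statement is the Claim_ definition above) =====
theorem maxCredits_spec : Claim_equal_maxCredits := by
  unfold Claim_equal_maxCredits
  intro inventory dispatch1 dispatch2 skips _ _
  unfold Spec_maxCredits maxCredits maxCredits_alt
  simp only []
  rw [pvSorted_eq_flatMap, pvALoop_flatMap]
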